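-- pv_equiv track=rewrite | github.com/ovenzeze/nimship-agent | tools/file_manager.py | _find_block_bounds
-- ===== SOURCE A (Python) =====
-- def _find_block_bounds(content: str, start_pos: int) -> tuple[int, int]:
--     """查找代码块的起止位置"""
--     lines = content.splitlines(True)
--     current_pos = 0
--     block_start = -1
--
--     # 找到包含起始位置的行
--     for i, line in enumerate(lines):
--         if current_pos <= start_pos < current_pos + len(line):
--             block_start = i
--             break
--         current_pos += len(line)
--
--     if block_start == -1:
--         raise ValueError("Invalid start position")
--
--     # 获取起始行的缩进级别
--     indent = len(lines[block_start]) - len(lines[block_start].lstrip())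
--
--     # 查找块结束位置
--     block_end = block_start + 1
--     while block_end < len(lines):
--         if lines[block_end].strip() and len(lines[block_end]) - len(lines[block_end].lstrip()) <= indent:
--             break
--         block_end += 1
--
--     # 转换为字符位置
--     start = sum(len(l) for l in lines[:block_start])
--     end = sum(len(l) for l in lines[:block_end])
--
--     return start, end
-- ===== SOURCE B (Python) =====
-- def _find_block_bounds(content: str, start_pos: int) -> tuple[int, int]:
--     lines = content.splitlines(True)
--     # prefix-sum table: offsets[i] = chars before line i; offsets[-1] = total length
--     offsets = [0]
--     for l in lines:
--         offsets.append(offsets[-1] + len(l))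
--     if not (0 <= start_pos < offsets[-1]):
--         raise ValueError("Invalid start position")
--     # binary search: block_start = last i with offsets[i] <= start_pos
--     lo, hi = 0, len(offsets)
--     while lo < hi:
--         mid = (lo + hi) // 2
--         if offsets[mid] <= start_pos:
--             lo = mid + 1
--         else:
--             hi = mid
--     block_start = lo - 1
--     line = lines[block_start]
--     indent = len(line) - len(line.lstrip())
--     n = len(lines)
--     block_end = next((j for j in range(block_start + 1, n)
--                       if lines[j].strip() and len(lines[j]) - len(lines[j].lstrip()) <= indent),
--                      n)
--     return offsets[block_start], offsets[block_end]
-- ===== Notes on version B (the rewrite author's own statement) =====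
-- stated objective: alternative
-- what changed: Replaces the accumulate-and-break line scan plus two slice re-summations with a prefix-sum offsets table built once, a binary search for the containing line, and direct table lookups for the returned positions.
import Mathlib
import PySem

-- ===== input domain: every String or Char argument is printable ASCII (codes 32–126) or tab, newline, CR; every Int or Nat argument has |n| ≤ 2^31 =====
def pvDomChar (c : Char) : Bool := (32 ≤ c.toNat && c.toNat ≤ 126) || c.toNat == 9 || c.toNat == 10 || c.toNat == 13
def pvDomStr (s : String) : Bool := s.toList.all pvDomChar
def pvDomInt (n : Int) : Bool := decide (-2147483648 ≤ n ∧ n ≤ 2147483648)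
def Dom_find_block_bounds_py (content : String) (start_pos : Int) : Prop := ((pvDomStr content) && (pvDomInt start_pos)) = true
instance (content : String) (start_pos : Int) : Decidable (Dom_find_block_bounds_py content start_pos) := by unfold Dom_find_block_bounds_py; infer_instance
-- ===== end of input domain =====

-- B replaces A's accumulate-and-break scan and slice re-summations with a prefix-sum offsets
-- table, a binary search for the containing line, and direct table lookups (objective: alternative).

-- str.splitlines(True) (keepends), ported by hand: exact on the Dom alphabet, whose only
-- line-break characters are '\n', '\r', '\r\n' (Python's extra breaks \x0b, \x0c, … are outside Dom).
def pvSplitKeepAux (cs : List Char) (acc : List Char) : List (List Char) :=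
  match cs with
  | [] => if acc.isEmpty then [] else [acc]
  | '\r' :: '\n' :: rest => (acc ++ ['\r', '\n']) :: pvSplitKeepAux rest []
  | '\r' :: rest => (acc ++ ['\r']) :: pvSplitKeepAux rest []
  | '\n' :: rest => (acc ++ ['\n']) :: pvSplitKeepAux rest []
  | c :: rest => pvSplitKeepAux rest (acc ++ [c])

def pvSplitKeep (cs : List Char) : List (List Char) := pvSplitKeepAux cs []

-- ===== PORT A =====
-- A's first loop: enumerate lines, accumulate current_pos, break at the containing line (none = ValueError)
def pvAFindLine (lines : List (List Char)) (sp : Int) (i : Nat) (cur : Nat) : Option Nat :=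
  match lines with
  | [] => none
  | l :: rest =>
    if (cur : Int) ≤ sp ∧ sp < (cur : Int) + l.length then some i
    else pvAFindLine rest sp (i + 1) (cur + l.length)

-- A's while loop searching for block_end
def pvAFindEnd (lines : List (List Char)) (indent : Nat) (j : Nat) : Nat :=
  if h : j < lines.length then
    if PySem.Chars.strip lines[j] ≠ [] ∧ lines[j].length - (PySem.Chars.lstrip lines[j]).length ≤ indent
    then j
    else pvAFindEnd lines indent (j + 1)
  else j
termination_by lines.length - j

def find_block_bounds_py (content : String) (start_pos : Int) : Int × Int :=
  let lines := pvSplitKeep content.toList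
  match pvAFindLine lines start_pos 0 0 with
  | none => (0, 0)  -- Python raises ValueError here; excluded by Pre_
  | some bs =>
    let line := lines.getD bs []
    let indent := line.length - (PySem.Chars.lstrip line).length
    let be := pvAFindEnd lines indent (bs + 1)
    (((lines.take bs).foldl (fun s l => s + l.length) 0 : Nat),
     ((lines.take be).foldl (fun s l => s + l.length) 0 : Nat))

-- ===== PORT B =====
-- offsets = [0]; for l in lines: offsets.append(offsets[-1] + len(l))
def pvOffsets (lines : List (List Char)) (cur : Nat) : List Nat :=
  match lines with
  | [] => [cur]
  | l :: rest => cur :: pvOffsets rest (cur + l.length)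

-- B's binary-search loop (bisect_right by hand)
def pvBisect (offs : List Nat) (sp : Int) (lo hi : Nat) : Nat :=
  if _h : lo < hi then
    let mid := (lo + hi) / 2
    if (offs.getD mid 0 : Int) ≤ sp then pvBisect offs sp (mid + 1) hi
    else pvBisect offs sp lo mid
  else lo
termination_by hi - lo
decreasing_by all_goals omega

def find_block_bounds_py_alt (content : String) (start_pos : Int) : Int × Int :=
  let lines := pvSplitKeep content.toList
  let offs := pvOffsets lines 0
  if 0 ≤ start_pos ∧ start_pos < (offs.getLastD 0 : Int) then
    let bs := pvBisect offs start_pos 0 offs.length - 1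
    let line := lines.getD bs []
    let indent := line.length - (PySem.Chars.lstrip line).length
    let be :=
      match (lines.drop (bs + 1)).findIdx?
          (fun l => decide (PySem.Chars.strip l ≠ []) &&
                    decide (l.length - (PySem.Chars.lstrip l).length ≤ indent)) with
      | some k => bs + 1 + k
      | none => lines.length
    ((offs.getD bs 0 : Nat), (offs.getD be 0 : Nat))
  else (0, 0)  -- Python raises ValueError here; excluded by Pre_

-- ===== PRECONDITION & SPEC =====
-- Pre_ excludes exactly the inputs on which A raises ValueError: start_pos negative or ≥ len(content).
def Pre_find_block_bounds_py (content : String) (start_pos : Int) : Prop :=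
  0 ≤ start_pos ∧ start_pos < (content.toList.length : Int)
instance (content : String) (start_pos : Int) : Decidable (Pre_find_block_bounds_py content start_pos) := by
  unfold Pre_find_block_bounds_py; infer_instance

def pvWitness_find_block_bounds_py : String × Int := ("a\n b\nc", 2)

def Spec_find_block_bounds_py (content : String) (start_pos : Int) (out : Int × Int) : Prop := out = find_block_bounds_py_alt content start_pos
instance (content : String) (start_pos : Int) (out : Int × Int) : Decidable (Spec_find_block_bounds_py content start_pos out) := by unfold Spec_find_block_bounds_py; infer_instance

-- ===== CLAIM (what is proved, stated in full; the proofs are below) =====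
def Claim_equal_find_block_bounds_py : Prop := ∀ (content : String) (start_pos : Int), Dom_find_block_bounds_py content start_pos → Pre_find_block_bounds_py content start_pos → Spec_find_block_bounds_py content start_pos (find_block_bounds_py content start_pos)

-- ===== LEMMAS AND PROOFS =====

def pvSumLen (ls : List (List Char)) : Nat := (ls.map List.length).sum

theorem pvSumLen_splitKeepAux (cs acc : List Char) :
    pvSumLen (pvSplitKeepAux cs acc) = acc.length + cs.length := by
  fun_induction pvSplitKeepAux cs acc <;>
    simp_all [pvSumLen, List.isEmpty_iff] <;> omega

theorem pvOffsets_length (lines : List (List Char)) (cur : Nat) :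
    (pvOffsets lines cur).length = lines.length + 1 := by
  induction lines generalizing cur <;> simp_all [pvOffsets]

theorem pvOffsets_getLastD (lines : List (List Char)) (cur : Nat) :
    (pvOffsets lines cur).getLastD 0 = cur + pvSumLen lines := by
  induction lines generalizing cur with
  | nil => simp [pvOffsets, pvSumLen]
  | cons l rest ih =>
    have hne : pvOffsets rest (cur + l.length) ≠ [] := by
      cases rest <;> simp [pvOffsets]
    have h2 := ih (cur + l.length)
    rw [pvOffsets, List.getLastD_cons]
    rw [List.getLastD_eq_getLast?] at h2 ⊢
    cases e : (pvOffsets rest (cur + l.length)).getLast? with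
    | none => exact absurd (List.getLast?_eq_none_iff.mp e) hne
    | some v =>
      rw [e] at h2
      simp [pvSumLen] at h2 ⊢
      omega

theorem pvOffsets_mem_ge (lines : List (List Char)) (cur : Nat) :
    ∀ o ∈ pvOffsets lines cur, cur ≤ o := by
  induction lines generalizing cur with
  | nil => simp [pvOffsets]
  | cons l rest ih =>
    intro o ho
    simp [pvOffsets] at ho
    rcases ho with h | h
    · omega
    · have := ih (cur + l.length) o h; omega

theorem pvOffsets_getD (lines : List (List Char)) (cur k : Nat) (hk : k ≤ lines.length) :
    (pvOffsets lines cur).getD k 0 = cur + pvSumLen (lines.take k) := by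
  induction lines generalizing cur k with
  | nil => simp at hk; subst hk; simp [pvOffsets, pvSumLen]
  | cons l rest ih =>
    cases k with
    | zero => simp [pvOffsets, pvSumLen]
    | succ k =>
      simp at hk
      rw [pvOffsets]
      show (pvOffsets rest (cur + l.length)).getD k 0 = _
      rw [ih (cur + l.length) k hk]
      simp [pvSumLen]
      omega

theorem pvOffsets_sorted (lines : List (List Char)) (cur : Nat) :
    (pvOffsets lines cur).Pairwise (· ≤ ·) := by
  induction lines generalizing cur with
  | nil => simp [pvOffsets]
  | cons l rest ih =>
    refine List.pairwise_cons.mpr ⟨?_, ih (cur + l.length)⟩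
    intro o ho
    have := pvOffsets_mem_ge rest (cur + l.length) o ho
    omega

theorem pvFoldl_sum (ls : List (List Char)) (a : Nat) :
    ls.foldl (fun s l => s + l.length) a = a + pvSumLen ls := by
  induction ls generalizing a <;> simp_all [pvSumLen] <;> omega

theorem pvOffsets_self_mem (lines : List (List Char)) (cur : Nat) :
    cur ∈ pvOffsets lines cur := by
  cases lines <;> simp [pvOffsets]

theorem pvOffsets_last_mem (lines : List (List Char)) (cur : Nat) :
    cur + pvSumLen lines ∈ pvOffsets lines cur := by
  induction lines generalizing cur with
  | nil => simp [pvOffsets, pvSumLen]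
  | cons l rest ih =>
    have hsl : pvSumLen (l :: rest) = l.length + pvSumLen rest := by simp [pvSumLen]
    have := ih (cur + l.length)
    simp only [pvOffsets, List.mem_cons]
    right
    convert this using 1
    omega

theorem pvCountP_of_boundary (offs : List Nat) (p : Nat → Bool) (lo : Nat)
    (hlo : lo ≤ offs.length)
    (h : ∀ i (hi : i < offs.length), p offs[i] = true ↔ i < lo) :
    offs.countP p = lo := by
  have hsplit : offs = offs.take lo ++ offs.drop lo := (List.take_append_drop lo offs).symm
  rw [hsplit, List.countP_append]
  have h1 : (offs.take lo).countP p = lo := by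
    rw [List.countP_eq_length.mpr, List.length_take_of_le hlo]
    intro a ha
    obtain ⟨i, hi, rfl⟩ := List.mem_iff_getElem.mp ha
    have hi' : i < lo := by simp [List.length_take] at hi; omega
    have hilen : i < offs.length := lt_of_lt_of_le hi' hlo
    rw [List.getElem_take]
    exact (h i hilen).mpr hi'
  have h2 : (offs.drop lo).countP p = 0 := by
    rw [List.countP_eq_zero]
    intro a ha
    obtain ⟨i, hi, rfl⟩ := List.mem_iff_getElem.mp ha
    have hilen : lo + i < offs.length := by simp [List.length_drop] at hi; omega
    rw [List.getElem_drop]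
    simp only [h (lo + i) hilen]
    omega
  omega

theorem pvAFindEnd_le (lines : List (List Char)) (indent j : Nat) :
    pvAFindEnd lines indent j ≤ max j lines.length := by
  fun_induction pvAFindEnd lines indent j with
  | case1 j h hp => omega
  | case2 j h hp ih => omega
  | case3 j h => omega

-- A's first loop computes (bisect_right offsets sp) - 1, expressed through countP
theorem pvAFindLine_eq_countP (lines : List (List Char)) (sp : Int) (i cur : Nat)
    (hc : (cur : Int) ≤ sp) :
    pvAFindLine lines sp i cur =
      if sp < (cur : Int) + pvSumLen lines then
        some (i + ((pvOffsets lines cur).countP (fun o : Nat => decide ((o : Int) ≤ sp)) - 1))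
      else none := by
  induction lines generalizing i cur with
  | nil =>
    have hneg : ¬ sp < (cur : Int) + ((pvSumLen ([] : List (List Char)) : Nat) : Int) := by
      simp [pvSumLen]; omega
    simp only [pvAFindLine]
    rw [if_neg hneg]
  | cons l rest ih =>
    by_cases hin : (cur : Int) ≤ sp ∧ sp < (cur : Int) + l.length
    · have hsl : pvSumLen (l :: rest) = l.length + pvSumLen rest := by simp [pvSumLen]
      have hlt : sp < (cur : Int) + ((pvSumLen (l :: rest) : Nat) : Int) := by
        rw [hsl]; push_cast; omega
      have hrest : (pvOffsets rest (cur + l.length)).countP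
          (fun o : Nat => decide ((o : Int) ≤ sp)) = 0 := by
        rw [List.countP_eq_zero]
        intro o ho
        have := pvOffsets_mem_ge rest (cur + l.length) o ho
        simp only [decide_eq_true_eq]
        push_cast
        omega
      rw [pvAFindLine, if_pos hin, if_pos hlt]
      simp [pvOffsets, hrest, hin.1]
    · have hge : (cur : Int) + l.length ≤ sp := by push_cast at hin ⊢; omega
      have hc' : ((cur + l.length : Nat) : Int) ≤ sp := by push_cast; omega
      rw [pvAFindLine, if_neg hin, ih (i + 1) (cur + l.length) hc']
      have hcnt1 : 1 ≤ (pvOffsets rest (cur + l.length)).countP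
          (fun o : Nat => decide ((o : Int) ≤ sp)) := by
        have hpos : 0 < (pvOffsets rest (cur + l.length)).countP
            (fun o : Nat => decide ((o : Int) ≤ sp)) :=
          List.countP_pos_iff.mpr ⟨cur + l.length, pvOffsets_self_mem rest (cur + l.length),
            decide_eq_true (by exact_mod_cast hc')⟩
        omega
      have hsl : pvSumLen (l :: rest) = l.length + pvSumLen rest := by simp [pvSumLen]
      have hsum : ((cur + l.length : Nat) : Int) + ((pvSumLen rest : Nat) : Int)
          = (cur : Int) + ((pvSumLen (l :: rest) : Nat) : Int) := by
        rw [hsl]; push_cast; ring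
      by_cases hlt : sp < ((cur + l.length : Nat) : Int) + ((pvSumLen rest : Nat) : Int)
      · rw [if_pos hlt, if_pos (by omega)]
        have hcons : (pvOffsets (l :: rest) cur).countP (fun o : Nat => decide ((o : Int) ≤ sp))
            = (pvOffsets rest (cur + l.length)).countP (fun o : Nat => decide ((o : Int) ≤ sp)) + 1 := by
          simp [pvOffsets, hc]
        rw [hcons]
        congr 1
        omega
      · rw [if_neg hlt, if_neg (by omega)]

theorem pvSorted_getElem_le (offs : List Nat) (hs : offs.Pairwise (· ≤ ·))
    (i j : Nat) (hij : i ≤ j) (hj : j < offs.length) :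
    offs[i]'(lt_of_le_of_lt hij hj) ≤ offs[j] := by
  rcases Nat.eq_or_lt_of_le hij with rfl | h
  · exact le_refl _
  · exact List.pairwise_iff_getElem.mp hs i j _ _ h

theorem pvBisect_inv (offs : List Nat) (sp : Int) (hs : offs.Pairwise (· ≤ ·)) :
    ∀ n lo hi, hi - lo = n → lo ≤ hi → hi ≤ offs.length →
    (∀ i (h : i < offs.length), i < lo → ((offs[i] : Nat) : Int) ≤ sp) →
    (∀ i (h : i < offs.length), hi ≤ i → ¬ ((offs[i] : Nat) : Int) ≤ sp) →
    pvBisect offs sp lo hi = offs.countP (fun o : Nat => decide ((o : Int) ≤ sp)) := by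
  intro n
  induction n using Nat.strong_induction_on with
  | _ n ihn =>
    intro lo hi hn hlh hhilen hlow hhigh
    rw [pvBisect]
    by_cases h : lo < hi
    · rw [dif_pos h]
      have hmidlt : (lo + hi) / 2 < offs.length := by omega
      have hgd : offs.getD ((lo + hi) / 2) 0 = offs[(lo + hi) / 2] := by
        simp [List.getD_eq_getElem?_getD, List.getElem?_eq_getElem hmidlt]
      simp only [hgd]
      by_cases hp : ((offs[(lo + hi) / 2] : Nat) : Int) ≤ sp
      · rw [if_pos hp]
        refine ihn (hi - ((lo + hi) / 2 + 1)) (by omega) ((lo + hi) / 2 + 1) hi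
          rfl (by omega) hhilen ?_ hhigh
        intro i hilen hi'
        have : offs[i] ≤ offs[(lo + hi) / 2] :=
          pvSorted_getElem_le offs hs i ((lo + hi) / 2) (by omega) hmidlt
        have : ((offs[i] : Nat) : Int) ≤ ((offs[(lo + hi) / 2] : Nat) : Int) := by
          exact_mod_cast this
        omega
      · rw [if_neg hp]
        refine ihn ((lo + hi) / 2 - lo) (by omega) lo ((lo + hi) / 2)
          rfl (by omega) (by omega) hlow ?_
        intro i hilen hi'
        have : offs[(lo + hi) / 2] ≤ offs[i] :=
          pvSorted_getElem_le offs hs ((lo + hi) / 2) i (by omega) hilen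
        have : ((offs[(lo + hi) / 2] : Nat) : Int) ≤ ((offs[i] : Nat) : Int) := by
          exact_mod_cast this
        omega
    · rw [dif_neg h]
      have hle : lo = hi := by omega
      refine (pvCountP_of_boundary offs _ lo (by omega) ?_).symm
      intro i hilen
      constructor
      · intro hdec
        by_contra hge
        exact hhigh i hilen (by omega) (by simpa using hdec)
      · intro hlt
        exact decide_eq_true (hlow i hilen hlt)

-- binary search computes countP on a sorted list
theorem pvBisect_eq_countP (offs : List Nat) (sp : Int) :
    offs.Pairwise (· ≤ ·) →
    pvBisect offs sp 0 offs.length = offs.countP (fun o : Nat => decide ((o : Int) ≤ sp)) := by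
  intro hs
  exact pvBisect_inv offs sp hs (offs.length - 0) 0 offs.length rfl (by omega) (le_refl _)
    (by omega) (fun i h hi => by omega)

theorem pvAFindEnd_eq_findIdx? (lines : List (List Char)) (indent j : Nat) (hj : j ≤ lines.length) :
    pvAFindEnd lines indent j =
      match (lines.drop j).findIdx?
          (fun l => decide (PySem.Chars.strip l ≠ []) &&
                    decide (l.length - (PySem.Chars.lstrip l).length ≤ indent)) with
      | some k => j + k
      | none => lines.length := by
  revert hj
  fun_induction pvAFindEnd lines indent j with
  | case1 j h hp =>
    intro hj
    rw [List.drop_eq_getElem_cons h, List.findIdx?_cons]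
    simp [hp.1, hp.2]
  | case2 j h hp ih =>
    intro hj
    rw [List.drop_eq_getElem_cons h, List.findIdx?_cons]
    rw [if_neg (by simpa using hp)]
    rw [ih (by omega)]
    generalize (lines.drop (j + 1)).findIdx?
        (fun l => decide (PySem.Chars.strip l ≠ []) &&
                  decide (l.length - (PySem.Chars.lstrip l).length ≤ indent)) = r
    cases r with
    | none => rfl
    | some k => show j + 1 + k = j + (k + 1); omega
  | case3 j h =>
    intro hj
    rw [List.drop_eq_nil_of_le (by omega)]
    simp
    omega

-- ===== VERDICT (by name: the statement is the Claim_ definition above) =====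
theorem find_block_bounds_py_spec : Claim_equal_find_block_bounds_py := by
  intro content sp hdom hpre
  obtain ⟨h0, hlt0⟩ := hpre
  unfold Spec_find_block_bounds_py
  have hS : pvSumLen (pvSplitKeep content.toList) = content.toList.length := by
    simpa using pvSumLen_splitKeepAux content.toList []
  have hlt : sp < ((pvSumLen (pvSplitKeep content.toList) : Nat) : Int) := by
    rw [hS]; exact hlt0
  simp only [find_block_bounds_py, find_block_bounds_py_alt]
  generalize hg : pvSplitKeep content.toList = lines at hlt ⊢
  -- shared notation
  have hsorted := pvOffsets_sorted lines 0
  have hlen : (pvOffsets lines 0).length = lines.length + 1 := pvOffsets_length lines 0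
  have hlast : (pvOffsets lines 0).getLastD 0 = pvSumLen lines := by
    simpa using pvOffsets_getLastD lines 0
  have hcount_pos : 1 ≤ (pvOffsets lines 0).countP (fun o : Nat => decide ((o : Int) ≤ sp)) := by
    have hpos : 0 < (pvOffsets lines 0).countP (fun o : Nat => decide ((o : Int) ≤ sp)) :=
      List.countP_pos_iff.mpr ⟨0, pvOffsets_self_mem lines 0,
        decide_eq_true (by exact_mod_cast h0)⟩
    omega
  have hcount_le : (pvOffsets lines 0).countP (fun o : Nat => decide ((o : Int) ≤ sp))
      ≤ lines.length := by
    by_contra hgt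
    have hle := List.countP_le_length
      (p := fun o : Nat => decide ((o : Int) ≤ sp)) (l := pvOffsets lines 0)
    have heq : (pvOffsets lines 0).countP (fun o : Nat => decide ((o : Int) ≤ sp))
        = (pvOffsets lines 0).length := by omega
    have hall := List.countP_eq_length.mp heq
    have hmem : pvSumLen lines ∈ pvOffsets lines 0 := by
      simpa using pvOffsets_last_mem lines 0
    have := hall _ hmem
    simp only [decide_eq_true_eq] at this
    omega
  -- the containing line: A's scan and B's bisect agree
  have hfind : pvAFindLine lines sp 0 0 =
      some ((pvOffsets lines 0).countP (fun o : Nat => decide ((o : Int) ≤ sp)) - 1) := by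
    rw [pvAFindLine_eq_countP lines sp 0 0 (by exact_mod_cast h0)]
    rw [if_pos (by push_cast; omega)]
    simp
  have hbis : pvBisect (pvOffsets lines 0) sp 0 (pvOffsets lines 0).length =
      (pvOffsets lines 0).countP (fun o : Nat => decide ((o : Int) ≤ sp)) :=
    pvBisect_eq_countP (pvOffsets lines 0) sp hsorted
  have hcond : 0 ≤ sp ∧ sp < (((pvOffsets lines 0).getLastD 0 : Nat) : Int) := by
    refine ⟨h0, ?_⟩
    rw [hlast]; exact hlt
  rw [hfind, if_pos hcond, hbis]
  -- both sides now use the same bs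
  generalize hbs : (pvOffsets lines 0).countP (fun o : Nat => decide ((o : Int) ≤ sp)) - 1 = bs
  have hbs1 : bs + 1 ≤ lines.length := by omega
  split
  next heq => exact absurd heq (by simp)
  next bs' heq =>
  obtain rfl : bs = bs' := by injection heq
  generalize hind : (lines.getD bs []).length - (PySem.Chars.lstrip (lines.getD bs [])).length = indent
  -- the end scans agree
  rw [pvAFindEnd_eq_findIdx? lines indent (bs + 1) hbs1]
  have hbe_le : pvAFindEnd lines indent (bs + 1) ≤ lines.length := by
    have := pvAFindEnd_le lines indent (bs + 1)
    omega
  rw [pvAFindEnd_eq_findIdx? lines indent (bs + 1) hbs1] at hbe_le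
  generalize hbe : (match (lines.drop (bs + 1)).findIdx?
      (fun l => decide (PySem.Chars.strip l ≠ []) &&
                decide (l.length - (PySem.Chars.lstrip l).length ≤ indent)) with
    | some k => bs + 1 + k
    | none => lines.length) = be at hbe_le ⊢
  -- positions: A's slice sums equal B's table lookups
  have h1 : (lines.take bs).foldl (fun s l => s + l.length) 0 = (pvOffsets lines 0).getD bs 0 := by
    rw [pvFoldl_sum, pvOffsets_getD lines 0 bs (by omega)]
  have h2 : (lines.take be).foldl (fun s l => s + l.length) 0 = (pvOffsets lines 0).getD be 0 := by
    rw [pvFoldl_sum, pvOffsets_getD lines 0 be hbe_le]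
  rw [h1, h2]
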